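-- pv_equiv track=rewrite | github.com/spacegraphcats/spacegraphcats | spacegraphcats/search/frontier_search.py | find_shadow
-- ===== SOURCE A (Python) =====
-- from typing import Dict, List, Set, Tuple, Union
--
-- def find_shadow(nodes: List[int], dag: Dict[int, List[int]]) -> Set[int]:
--     shadow = set()  # type: Set[int]
--
--     seen_nodes = set()  # type: Set[int]
--
--     def add_to_shadow(node_id: int):
--         if node_id in seen_nodes:
--             return
--         seen_nodes.add(node_id)
--
--         children_ids = dag[node_id]
--
--         if len(children_ids) == 0:
--             shadow.add(node_id)
--         else:
--             for child in children_ids: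
--                 add_to_shadow(child)
--
--     for node in nodes:
--         add_to_shadow(node)
--
--     return shadow
-- ===== SOURCE B (Python) =====
-- from typing import Dict, List, Set
--
-- def find_shadow(nodes: List[int], dag: Dict[int, List[int]]) -> Set[int]:
--     # Phase 1: compute the DFS preorder list of distinct reachable nodes.
--     visited = []  # type: List[int]
--     stack = list(reversed(nodes))
--     while stack:
--         n = stack.pop()
--         if n not in visited:
--             visited.append(n)
--             stack.extend(reversed(dag[n]))
--     # Phase 2: the shadow is exactly the reachable leaves.
--     return {n for n in visited if len(dag[n]) == 0}
-- ===== Notes on version B (the rewrite author's own statement) =====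
-- stated objective: alternative
-- what changed: A single recursive traversal that threads the shadow set through every call is replaced by two separate phases: an iterative stack-based DFS that only records the visit order, followed by a comprehension that filters the visited nodes down to the leaves.
import Mathlib
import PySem

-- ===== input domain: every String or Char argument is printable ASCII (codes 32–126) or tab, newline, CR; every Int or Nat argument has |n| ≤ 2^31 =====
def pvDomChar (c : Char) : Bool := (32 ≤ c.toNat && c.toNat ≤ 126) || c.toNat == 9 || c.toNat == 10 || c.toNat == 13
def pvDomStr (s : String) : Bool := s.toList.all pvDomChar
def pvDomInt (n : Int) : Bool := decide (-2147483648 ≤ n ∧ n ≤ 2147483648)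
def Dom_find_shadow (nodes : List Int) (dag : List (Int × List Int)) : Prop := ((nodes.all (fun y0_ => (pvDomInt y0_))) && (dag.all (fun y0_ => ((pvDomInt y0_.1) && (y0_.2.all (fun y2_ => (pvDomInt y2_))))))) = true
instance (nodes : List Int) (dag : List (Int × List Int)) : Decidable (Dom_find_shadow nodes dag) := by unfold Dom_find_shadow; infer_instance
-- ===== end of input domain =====

-- B replaces A's single recursive traversal that threads the shadow set through every call by two
-- phases: an iterative stack DFS recording only the visit order, then a filter keeping the leaves.

-- dag[k]: first-match lookup in the association list (Python dict lookup; none = KeyError)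
def pvLookup (dag : List (Int × List Int)) (k : Int) : Option (List Int) :=
  (dag.find? (fun kv => kv.1 == k)).map (·.2)

-- number of dag entries whose key is not yet in seen: the termination measure of both ports
def pvUnseen (dag : List (Int × List Int)) (seen : List Int) : Nat :=
  (dag.filter (fun kv => !(seen.contains kv.1))).length

theorem pv_filter_le (dag : List (Int × List Int)) (s t : List Int) (hsub : ∀ x, x ∈ s → x ∈ t) :
    (dag.filter (fun kv => !(t.contains kv.1))).length ≤ (dag.filter (fun kv => !(s.contains kv.1))).length := by
  induction dag with
  | nil => simp
  | cons kv rest ih =>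
    simp only [List.filter_cons, List.contains_eq_mem] at ih ⊢
    by_cases hs : kv.1 ∈ s
    · have ht : kv.1 ∈ t := hsub _ hs
      simpa [hs, ht] using ih
    · by_cases ht : kv.1 ∈ t <;> simp [hs, ht] <;> omega

theorem pv_filter_lt (dag : List (Int × List Int)) (s t : List Int) (hsub : ∀ x, x ∈ s → x ∈ t)
    (node : Int) (ht0 : node ∈ t) (hs0 : node ∉ s)
    (hkey : ∃ ch, pvLookup dag node = some ch) :
    (dag.filter (fun kv => !(t.contains kv.1))).length < (dag.filter (fun kv => !(s.contains kv.1))).length := by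
  induction dag with
  | nil => simp [pvLookup] at hkey
  | cons kv rest ih =>
    simp only [List.filter_cons, List.contains_eq_mem] at ih ⊢
    by_cases hk : kv.1 = node
    · have hs1 : kv.1 ∉ s := hk ▸ hs0
      have ht1 : kv.1 ∈ t := hk ▸ ht0
      have hle := pv_filter_le rest s t hsub
      simp only [List.contains_eq_mem] at hle
      simp [hs1, ht1]
      omega
    · rcases hkey with ⟨ch, hget⟩
      have hget' : ∃ ch, pvLookup rest node = some ch := by
        refine ⟨ch, ?_⟩
        simpa [pvLookup, List.find?_cons, show (kv.1 == node) = false by simp [hk]] using hget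
      have hlt := ih hget'
      by_cases hs : kv.1 ∈ s
      · have ht : kv.1 ∈ t := hsub _ hs
        simp [hs, ht]; omega
      · by_cases ht : kv.1 ∈ t <;> simp [hs, ht] <;> omega

-- seen only grows, so pvUnseen never grows …
theorem pvUnseen_add_le (dag : List (Int × List Int)) (seen : List Int) (node : Int) :
    pvUnseen dag (PySem.Set.add seen node) ≤ pvUnseen dag seen :=
  pv_filter_le dag seen (PySem.Set.add seen node)
    (fun x hx => (PySem.Set.mem_add _ _ _).mpr (Or.inl hx))

-- … and strictly shrinks when an unseen dag key is added to seen
theorem pvUnseen_add_lt (dag : List (Int × List Int)) (seen : List Int) (node : Int)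
    (hkey : ∃ ch, pvLookup dag node = some ch) (hns : node ∉ seen) :
    pvUnseen dag (PySem.Set.add seen node) < pvUnseen dag seen :=
  pv_filter_lt dag seen (PySem.Set.add seen node)
    (fun x hx => (PySem.Set.mem_add _ _ _).mpr (Or.inl hx))
    node ((PySem.Set.mem_add _ _ _).mpr (Or.inr rfl)) hns hkey

-- same fact for B's 'visited.append(n)' (seen ++ [node])
theorem pvUnseen_append_lt (dag : List (Int × List Int)) (seen : List Int) (node : Int)
    (hkey : ∃ ch, pvLookup dag node = some ch) (hns : node ∉ seen) :
    pvUnseen dag (seen ++ [node]) < pvUnseen dag seen :=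
  pv_filter_lt dag seen (seen ++ [node])
    (fun x hx => List.mem_append.mpr (Or.inl hx))
    node (List.mem_append.mpr (Or.inr (List.mem_singleton.mpr rfl))) hns hkey

-- ===== PORT A =====
-- A's recursive helper add_to_shadow, fused with its 'for child in children_ids' loop into one
-- list recursion ('pvLoopA dag cs seen shadow' = 'for c in cs: add_to_shadow(c)'); the subtype
-- only records the invariant "seen grows", needed to justify termination of the sequencing call.
def pvLoopA (dag : List (Int × List Int)) :
    (l : List Int) → (seen : List Int) → (shadow : List Int) →
    Option {p : List Int × List Int // pvUnseen dag p.1 ≤ pvUnseen dag seen}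
  | [], seen, shadow => some ⟨(seen, shadow), Nat.le_refl _⟩
  | node :: rest, seen, shadow =>
    if h : node ∈ seen then                       -- if node_id in seen_nodes: return
      pvLoopA dag rest seen shadow
    else
      match h2 : pvLookup dag node with
      | none => none                              -- KeyError: dag[node_id]
      | some children =>
        if children.length = 0 then               -- if len(children_ids) == 0: shadow.add(node_id)
          (pvLoopA dag rest (PySem.Set.add seen node) (PySem.Set.add shadow node)).map
            (fun r => ⟨r.1, Nat.le_trans r.2 (pvUnseen_add_le dag seen node)⟩)
        else                                      -- else: for child in children_ids: add_to_shadow(child)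
          match pvLoopA dag children (PySem.Set.add seen node) shadow with
          | none => none
          | some r =>
            (pvLoopA dag rest r.1.1 r.1.2).map
              (fun r' => ⟨r'.1, Nat.le_trans r'.2 (Nat.le_trans r.2 (pvUnseen_add_le dag seen node))⟩)
  termination_by l seen _ => (pvUnseen dag seen, l.length)
  decreasing_by
  · exact Prod.Lex.right _ (Nat.lt_succ_self _)
  · exact Prod.Lex.left _ _ (pvUnseen_add_lt dag seen node ⟨children, h2⟩ h)
  · exact Prod.Lex.left _ _ (pvUnseen_add_lt dag seen node ⟨children, h2⟩ h)
  · exact Prod.Lex.left _ _ (Nat.lt_of_le_of_lt r.2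
      (pvUnseen_add_lt dag seen node ⟨children, h2⟩ h))

def find_shadow (nodes : List Int) (dag : List (Int × List Int)) : List Int :=
  match pvLoopA dag nodes [] [] with
  | none => []              -- unreachable under Pre_find_shadow (the Python raises KeyError)
  | some r => r.1.2

-- ===== PORT B =====
-- Phase 1 of B: the while loop over an explicit stack, recording only the visit order 'visited'
-- (the Lean list holds the Python stack reversed, head = top, so 'stack.pop()' is the head,
-- 'stack = list(reversed(nodes))' is 'nodes' and 'stack.extend(reversed(dag[n]))' is 'ch ++ rest';
-- 'visited.append(n)' is 'visited ++ [n]').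
def pvVisitB (dag : List (Int × List Int)) :
    (stack : List Int) → (visited : List Int) → Option (List Int)
  | [], visited => some visited                   -- while stack: …
  | n :: rest, visited =>                         -- n = stack.pop()
    if h : n ∈ visited then                       -- if n not in visited:
      pvVisitB dag rest visited
    else
      match h2 : pvLookup dag n with
      | none => none                              -- KeyError: dag[n]
      | some ch =>                                -- visited.append(n); stack.extend(reversed(dag[n]))
        pvVisitB dag (ch ++ rest) (visited ++ [n])
  termination_by stack visited => (pvUnseen dag visited, stack.length)
  decreasing_by
  · exact Prod.Lex.right _ (Nat.lt_succ_self _)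
  · exact Prod.Lex.left _ _ (pvUnseen_append_lt dag visited n ⟨ch, h2⟩ h)

-- Phase 2 of B: '{n for n in visited if len(dag[n]) == 0}' (every visited n is a dag key,
-- so getD never hits its default on a reachable input).
def find_shadow_alt (nodes : List Int) (dag : List (Int × List Int)) : List Int :=
  match pvVisitB dag nodes [] with
  | none => []              -- unreachable under Pre_find_shadow (the Python raises KeyError)
  | some visited => visited.filter (fun n => ((pvLookup dag n).getD []).isEmpty)

-- ===== PRECONDITION & SPEC =====
-- Pre_ holds exactly when dag[node_id] never raises KeyError: every node reachable from nodes
-- along dag edges is a dag key (computed as a bounded closure; it stabilizes within dag.length+1 steps).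
def pvIsKey (dag : List (Int × List Int)) (k : Int) : Bool :=
  dag.any (fun kv => kv.1 == k)

def pvStep (dag : List (Int × List Int)) (s : List Int) : List Int :=
  PySem.Set.update s (s.flatMap (fun k => (pvLookup dag k).getD []))

def Pre_find_shadow (nodes : List Int) (dag : List (Int × List Int)) : Prop :=
  (((pvStep dag)^[dag.length + 1] (PySem.Set.ofList nodes)).all (pvIsKey dag)) = true
instance (nodes : List Int) (dag : List (Int × List Int)) : Decidable (Pre_find_shadow nodes dag) := by
  unfold Pre_find_shadow; infer_instance

def pvWitness_find_shadow : List Int × (List (Int × List Int)) :=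
  ([1, 2], [(1, [2, 3]), (2, []), (3, [])])

def Spec_find_shadow (nodes : List Int) (dag : List (Int × List Int)) (out : List Int) : Prop := out = find_shadow_alt nodes dag
instance (nodes : List Int) (dag : List (Int × List Int)) (out : List Int) : Decidable (Spec_find_shadow nodes dag out) := by unfold Spec_find_shadow; infer_instance

-- ===== CLAIM (what is proved, stated in full; the proofs are below) =====
def Claim_equal_find_shadow : Prop := ∀ (nodes : List Int) (dag : List (Int × List Int)), Dom_find_shadow nodes dag → Pre_find_shadow nodes dag → Spec_find_shadow nodes dag (find_shadow nodes dag)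

-- ===== LEMMAS AND PROOFS =====

theorem pvLoopA_cons_none (dag : List (Int × List Int)) (node : Int) (rest seen shadow : List Int)
    (h : node ∉ seen) (h2 : pvLookup dag node = none) :
    pvLoopA dag (node :: rest) seen shadow = none := by
  rw [pvLoopA]
  simp only [dif_neg h]
  split
  · rfl
  · simp_all

theorem pvLoopA_cons_some (dag : List (Int × List Int)) (node : Int) (rest seen shadow : List Int)
    (ch : List Int) (h : node ∉ seen) (h2 : pvLookup dag node = some ch) :
    pvLoopA dag (node :: rest) seen shadow =
      (if ch.length = 0 then
        (pvLoopA dag rest (PySem.Set.add seen node) (PySem.Set.add shadow node)).map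
          (fun r => ⟨r.1, Nat.le_trans r.2 (pvUnseen_add_le dag seen node)⟩)
      else
        match pvLoopA dag ch (PySem.Set.add seen node) shadow with
        | none => none
        | some r =>
          (pvLoopA dag rest r.1.1 r.1.2).map
            (fun r' => ⟨r'.1, Nat.le_trans r'.2 (Nat.le_trans r.2 (pvUnseen_add_le dag seen node))⟩)) := by
  rw [pvLoopA]
  simp only [dif_neg h]
  split
  · simp_all
  · rename_i c heq
    rw [heq] at h2
    injection h2 with h2
    subst h2
    rfl

theorem pvLoopA_cons_seen (dag : List (Int × List Int)) (node : Int) (rest seen shadow : List Int)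
    (h : node ∈ seen) :
    pvLoopA dag (node :: rest) seen shadow = pvLoopA dag rest seen shadow := by
  rw [pvLoopA]; simp only [dif_pos h]

theorem pvVisitB_cons_seen (dag : List (Int × List Int)) (n : Int) (rest visited : List Int)
    (h : n ∈ visited) :
    pvVisitB dag (n :: rest) visited = pvVisitB dag rest visited := by
  rw [pvVisitB]; simp only [dif_pos h]

theorem pvVisitB_cons_none (dag : List (Int × List Int)) (n : Int) (rest visited : List Int)
    (h : n ∉ visited) (h2 : pvLookup dag n = none) :
    pvVisitB dag (n :: rest) visited = none := by
  rw [pvVisitB]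
  simp only [dif_neg h]
  split
  · rfl
  · simp_all

theorem pvVisitB_cons_some (dag : List (Int × List Int)) (n : Int) (rest visited : List Int)
    (ch : List Int) (h : n ∉ visited) (h2 : pvLookup dag n = some ch) :
    pvVisitB dag (n :: rest) visited = pvVisitB dag (ch ++ rest) (visited ++ [n]) := by
  rw [pvVisitB]
  simp only [dif_neg h]
  split
  · simp_all
  · rename_i c heq
    rw [heq] at h2
    injection h2 with h2
    subst h2
    rfl

-- A's Set.add on an unseen node is B's append
theorem pvSet_add_not_mem (s : List Int) (x : Int) (h : x ∉ s) :
    PySem.Set.add s x = s ++ [x] := by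
  simp [PySem.Set.add, PySem.Set.contains, h]

-- simulation: B's phase-1 stack run on l ++ rest equals A's recursive run on l (any shadow;
-- the shadow never influences control flow) followed by B's run on rest from A's final seen
theorem pvVisitB_append (dag : List (Int × List Int)) :
    ∀ (l : List Int) (seen shadow : List Int), ∀ (rest : List Int),
      pvVisitB dag (l ++ rest) seen =
        match pvLoopA dag l seen shadow with
        | none => none
        | some r => pvVisitB dag rest r.1.1 := by
  intro l seen shadow
  induction l, seen, shadow using pvLoopA.induct dag with
  | case1 seen shadow =>
    intro rest
    simp [pvLoopA]
  | case2 node rest' seen shadow h ih =>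
    intro rest
    simp only [List.cons_append]
    rw [pvVisitB_cons_seen dag node (rest' ++ rest) seen h,
        pvLoopA_cons_seen dag node rest' seen shadow h]
    exact ih rest
  | case3 node rest' seen shadow h h2 =>
    intro rest
    simp only [List.cons_append]
    rw [pvVisitB_cons_none dag node (rest' ++ rest) seen h h2,
        pvLoopA_cons_none dag node rest' seen shadow h h2]
  | case4 node rest' seen shadow h children h2 hlen ih =>
    intro rest
    have hc : children = [] := List.length_eq_zero_iff.mp hlen
    subst hc
    simp only [List.cons_append]
    rw [pvVisitB_cons_some dag node (rest' ++ rest) seen [] h h2,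
        pvLoopA_cons_some dag node rest' seen shadow [] h h2]
    simp only [List.nil_append, List.length_nil, if_true]
    rw [← pvSet_add_not_mem seen node h]
    rw [ih rest]
    cases pvLoopA dag rest' (PySem.Set.add seen node) (PySem.Set.add shadow node) <;> simp
  | case5 node rest' seen shadow h children h2 hlen hnone ihc =>
    intro rest
    simp only [List.cons_append]
    rw [pvVisitB_cons_some dag node (rest' ++ rest) seen children h h2,
        pvLoopA_cons_some dag node rest' seen shadow children h h2]
    simp only [hlen, if_false]
    rw [← pvSet_add_not_mem seen node h, ihc (rest' ++ rest)]
    simp only [hnone]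
  | case6 node rest' seen shadow h children h2 hlen r hsome ihc ihr =>
    intro rest
    simp only [List.cons_append]
    rw [pvVisitB_cons_some dag node (rest' ++ rest) seen children h h2,
        pvLoopA_cons_some dag node rest' seen shadow children h h2]
    simp only [hlen, if_false]
    rw [← pvSet_add_not_mem seen node h, ihc (rest' ++ rest)]
    simp only [hsome]
    rw [ihr rest]
    cases pvLoopA dag rest' (r.1.1) (r.1.2) <;> simp

-- characterization of A's state: starting from (seen, shadow) with shadow ⊆ seen, a successful
-- run appends some fresh block 'delta' to seen and exactly delta's leaves to shadow
theorem pvLoopA_shadow (dag : List (Int × List Int)) :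
    ∀ (l : List Int) (seen shadow : List Int),
      (∀ x, x ∈ shadow → x ∈ seen) →
      ∀ r, pvLoopA dag l seen shadow = some r →
      ∃ delta, r.1.1 = seen ++ delta ∧
        r.1.2 = shadow ++ delta.filter (fun n => ((pvLookup dag n).getD []).isEmpty) := by
  intro l seen shadow
  induction l, seen, shadow using pvLoopA.induct dag with
  | case1 seen shadow =>
    intro _ r hr
    simp only [pvLoopA, Option.some.injEq] at hr
    exact ⟨[], by simp [← hr]⟩
  | case2 node rest' seen shadow h ih =>
    intro hsub r hr
    rw [pvLoopA_cons_seen dag node rest' seen shadow h] at hr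
    exact ih hsub r hr
  | case3 node rest' seen shadow h h2 =>
    intro _ r hr
    rw [pvLoopA_cons_none dag node rest' seen shadow h h2] at hr
    exact absurd hr (by simp)
  | case4 node rest' seen shadow h children h2 hlen ih =>
    intro hsub r hr
    have hc : children = [] := List.length_eq_zero_iff.mp hlen
    subst hc
    rw [pvLoopA_cons_some dag node rest' seen shadow [] h h2] at hr
    simp only [List.length_nil, if_true, Option.map_eq_some_iff] at hr
    obtain ⟨r', hr', hmap⟩ := hr
    have hns : node ∉ shadow := fun hx => h (hsub _ hx)
    have hsub' : ∀ x, x ∈ PySem.Set.add shadow node → x ∈ PySem.Set.add seen node := by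
      intro x hx
      rcases (PySem.Set.mem_add _ _ _).mp hx with hx | hx
      · exact (PySem.Set.mem_add _ _ _).mpr (Or.inl (hsub _ hx))
      · exact (PySem.Set.mem_add _ _ _).mpr (Or.inr hx)
    obtain ⟨delta, hd1, hd2⟩ := ih hsub' r' hr'
    refine ⟨node :: delta, ?_, ?_⟩
    · rw [← hmap]
      simp only [hd1, pvSet_add_not_mem seen node h, List.append_assoc, List.singleton_append]
    · rw [← hmap]
      simp only [hd2, pvSet_add_not_mem shadow node hns, List.filter_cons]
      simp [h2, List.append_assoc]
  | case5 node rest' seen shadow h children h2 hlen hnone ihc =>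
    intro _ r hr
    rw [pvLoopA_cons_some dag node rest' seen shadow children h h2] at hr
    simp only [hlen, if_false, hnone] at hr
    exact absurd hr (by simp)
  | case6 node rest' seen shadow h children h2 hlen r1 hsome ihc ihr =>
    intro hsub r hr
    rw [pvLoopA_cons_some dag node rest' seen shadow children h h2] at hr
    simp only [hlen, if_false, hsome, Option.map_eq_some_iff] at hr
    obtain ⟨r', hr', hmap⟩ := hr
    have hsubc : ∀ x, x ∈ shadow → x ∈ PySem.Set.add seen node := by
      intro x hx
      exact (PySem.Set.mem_add _ _ _).mpr (Or.inl (hsub _ hx))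
    obtain ⟨dc, hc1, hc2⟩ := ihc hsubc r1 hsome
    have hsubr : ∀ x, x ∈ r1.1.2 → x ∈ r1.1.1 := by
      intro x hx
      rw [hc2] at hx
      rw [hc1]
      rcases List.mem_append.mp hx with hx | hx
      · exact List.mem_append.mpr (Or.inl ((PySem.Set.mem_add _ _ _).mpr (Or.inl (hsub _ hx))))
      · exact List.mem_append.mpr (Or.inr (List.mem_of_mem_filter hx))
    obtain ⟨dr, hr1, hr2⟩ := ihr hsubr r' hr'
    refine ⟨node :: (dc ++ dr), ?_, ?_⟩
    · rw [← hmap, hr1, hc1]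
      simp [pvSet_add_not_mem seen node h, List.append_assoc]
    · rw [← hmap, hr2, hc2]
      have hpred : (((pvLookup dag node).getD []).isEmpty) = false := by
        rw [h2]
        cases children with
        | nil => simp at hlen
        | cons a t => rfl
      simp [List.filter_cons, hpred, List.filter_append, List.append_assoc]

theorem find_shadow_spec : Claim_equal_find_shadow := by
  intro nodes dag _ _
  unfold Spec_find_shadow find_shadow find_shadow_alt
  have h := pvVisitB_append dag nodes [] [] []
  rw [List.append_nil] at h
  rw [h]
  cases hA : pvLoopA dag nodes [] [] with
  | none => simp
  | some r =>
    simp only [pvVisitB]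
    obtain ⟨delta, hd1, hd2⟩ := pvLoopA_shadow dag nodes [] [] (by simp) r hA
    simp only [List.nil_append] at hd1 hd2
    rw [hd1, hd2]
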